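-- pv_equiv track=rewrite | github.com/Nithin8919/AI_policy_assistant | src/vertical_builders/legal_builder.py | _analyze_section_types
-- ===== SOURCE A (Python) =====
-- from typing import Dict, List, Optional, Set, Tuple
--
-- def _analyze_section_types(sections: Dict) -> Dict[str, int]:
--     """Analyze types of sections (main, subsection, clause)."""
--     counts = {"main_sections": 0, "subsections": 0, "clauses": 0}
--
--     for section_id, section_data in sections.items():
--         if section_data.get("clause"):
--             counts["clauses"] += 1
--         elif section_data.get("subsection"):
--             counts["subsections"] += 1
--         else:
--             counts["main_sections"] += 1
--
--     return counts
-- ===== SOURCE B (Python) =====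
-- def _analyze_section_types(sections):
--     """Analyze types of sections (main, subsection, clause)."""
--     total = len(sections)
--     clauses = sum(1 for s in sections.values() if s.get("clause"))
--     subsections = sum(1 for s in sections.values()
--                       if not s.get("clause") and s.get("subsection"))
--     return {
--         "main_sections": total - clauses - subsections,
--         "subsections": subsections,
--         "clauses": clauses,
--     }
-- ===== Notes on version B (the rewrite author's own statement) =====
-- stated objective: alternative
-- what changed: Replaces the single mutating if/elif/else loop over a counts dict by independent counting passes (clauses, then subsections excluding clauses) plus a closed-form subtraction for main_sections.
import Mathlib
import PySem

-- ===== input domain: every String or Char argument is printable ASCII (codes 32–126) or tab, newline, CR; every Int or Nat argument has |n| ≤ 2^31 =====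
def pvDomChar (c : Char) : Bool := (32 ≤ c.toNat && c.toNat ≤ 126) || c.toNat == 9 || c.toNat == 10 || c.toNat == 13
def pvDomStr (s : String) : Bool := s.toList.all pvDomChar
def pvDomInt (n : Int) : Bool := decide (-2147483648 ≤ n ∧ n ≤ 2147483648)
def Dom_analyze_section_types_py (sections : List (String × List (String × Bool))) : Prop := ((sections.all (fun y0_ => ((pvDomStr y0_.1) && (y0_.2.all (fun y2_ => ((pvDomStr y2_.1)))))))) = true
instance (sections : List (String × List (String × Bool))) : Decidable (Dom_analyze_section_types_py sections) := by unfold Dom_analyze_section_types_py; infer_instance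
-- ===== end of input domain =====

-- B replaces A's single if/elif/else loop over a mutable counts dict by independent
-- filter-count passes plus a subtraction for the main bucket (alternative decomposition, same cost).


-- ===== PORT A =====
-- one loop, counts dict mutated by precedence branching (clause > subsection > main)
def analyze_section_types_py (sections : List (String × List (String × Bool))) : List (String × Int) :=
  let counts : PySem.Dict String Int :=
    PySem.Dict.mk [("main_sections", 0), ("subsections", 0), ("clauses", 0)]
  let counts := sections.foldl (fun counts sec =>
    let section_data := PySem.Dict.mk sec.2
    if section_data.getD "clause" false then
      counts.insert "clauses" (counts.getD "clauses" 0 + 1)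
    else if section_data.getD "subsection" false then
      counts.insert "subsections" (counts.getD "subsections" 0 + 1)
    else
      counts.insert "main_sections" (counts.getD "main_sections" 0 + 1)) counts
  counts.items

-- ===== PORT B =====
def analyze_section_types_py_alt (sections : List (String × List (String × Bool))) : List (String × Int) :=
  let vals := sections.map (·.2)
  let total : Int := vals.length
  let clauses : Int :=
    (vals.filter (fun s => (PySem.Dict.mk s).getD "clause" false)).length
  let subsections : Int :=
    (vals.filter (fun s =>
      !(PySem.Dict.mk s).getD "clause" false && (PySem.Dict.mk s).getD "subsection" false)).length
  [("main_sections", total - clauses - subsections),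
   ("subsections", subsections),
   ("clauses", clauses)]

-- ===== PRECONDITION & SPEC =====
def Spec_analyze_section_types_py (sections : List (String × List (String × Bool))) (out : List (String × Int)) : Prop := out = analyze_section_types_py_alt sections
instance (sections : List (String × List (String × Bool))) (out : List (String × Int)) : Decidable (Spec_analyze_section_types_py sections out) := by unfold Spec_analyze_section_types_py; infer_instance

-- ===== CLAIM (what is proved, stated in full; the proofs are below) =====
def Claim_equal_analyze_section_types_py : Prop := ∀ (sections : List (String × List (String × Bool))), Dom_analyze_section_types_py sections → Spec_analyze_section_types_py sections (analyze_section_types_py sections)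

-- ===== LEMMAS AND PROOFS =====
def pvIsCls (s : List (String × Bool)) : Bool := (PySem.Dict.mk s).getD "clause" false
def pvIsSub (s : List (String × Bool)) : Bool :=
  !(PySem.Dict.mk s).getD "clause" false && (PySem.Dict.mk s).getD "subsection" false

lemma pvLoop_items (l : List (String × List (String × Bool))) (m s c : Int) :
    (l.foldl (fun counts sec =>
        let section_data := PySem.Dict.mk sec.2
        if section_data.getD "clause" false then
          counts.insert "clauses" (counts.getD "clauses" 0 + 1)
        else if section_data.getD "subsection" false then
          counts.insert "subsections" (counts.getD "subsections" 0 + 1)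
        else
          counts.insert "main_sections" (counts.getD "main_sections" 0 + 1))
      (PySem.Dict.mk [("main_sections", m), ("subsections", s), ("clauses", c)])).items
    = [("main_sections", m + ((l.filter (fun x => !pvIsCls x.2 && !pvIsSub x.2)).length : Int)),
       ("subsections", s + ((l.filter (fun x => pvIsSub x.2)).length : Int)),
       ("clauses", c + ((l.filter (fun x => pvIsCls x.2)).length : Int))] := by
  induction l generalizing m s c with
  | nil => simp
  | cons hd tl ih =>
    have hins : ∀ (k : String) (m' s' c' : Int),
        (PySem.Dict.mk [("main_sections", m), ("subsections", s), ("clauses", c)]).insert k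
          ((PySem.Dict.mk [("main_sections", m), ("subsections", s), ("clauses", c)]).getD k 0 + 1)
          = PySem.Dict.mk [("main_sections", m'), ("subsections", s'), ("clauses", c')] →
        (List.foldl (fun counts sec =>
            let section_data := PySem.Dict.mk sec.2
            if section_data.getD "clause" false then
              counts.insert "clauses" (counts.getD "clauses" 0 + 1)
            else if section_data.getD "subsection" false then
              counts.insert "subsections" (counts.getD "subsections" 0 + 1)
            else
              counts.insert "main_sections" (counts.getD "main_sections" 0 + 1))
          ((PySem.Dict.mk [("main_sections", m), ("subsections", s), ("clauses", c)]).insert k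
            ((PySem.Dict.mk [("main_sections", m), ("subsections", s), ("clauses", c)]).getD k 0 + 1)) tl).items
          = [("main_sections", m' + ((tl.filter (fun x => !pvIsCls x.2 && !pvIsSub x.2)).length : Int)),
             ("subsections", s' + ((tl.filter (fun x => pvIsSub x.2)).length : Int)),
             ("clauses", c' + ((tl.filter (fun x => pvIsCls x.2)).length : Int))] := by
      intro k m' s' c' h
      rw [h, ih]
    by_cases hc : (PySem.Dict.mk hd.2).getD "clause" false = true
    · simp only [List.foldl_cons, hc, if_true]
      rw [hins "clauses" m s (c + 1) (by
        apply PySem.Dict.ext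
        simp [PySem.Dict.items_insert, PySem.Dict.getD_eq_get?_getD, PySem.Dict.get?_mk_cons])]
      simp only [List.filter_cons, pvIsCls, pvIsSub, hc]
      simp
      omega
    · by_cases hs : (PySem.Dict.mk hd.2).getD "subsection" false = true
      · simp only [List.foldl_cons, hc, hs, if_true, Bool.false_eq_true, if_false]
        rw [hins "subsections" m (s + 1) c (by
          apply PySem.Dict.ext
          simp [PySem.Dict.items_insert, PySem.Dict.getD_eq_get?_getD, PySem.Dict.get?_mk_cons])]
        simp only [List.filter_cons, pvIsCls, pvIsSub, hc, hs]
        simp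
        omega
      · simp only [List.foldl_cons, hc, hs, Bool.false_eq_true, if_false]
        rw [hins "main_sections" (m + 1) s c (by
          apply PySem.Dict.ext
          simp [PySem.Dict.items_insert, PySem.Dict.getD_eq_get?_getD, PySem.Dict.get?_mk_cons])]
        simp only [List.filter_cons, pvIsCls, pvIsSub, hc, hs]
        simp
        omega

lemma pvPartition (l : List (String × List (String × Bool))) :
    (l.filter (fun x => !pvIsCls x.2 && !pvIsSub x.2)).length
      + (l.filter (fun x => pvIsSub x.2)).length
      + (l.filter (fun x => pvIsCls x.2)).length = l.length := by
  induction l with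
  | nil => simp
  | cons hd tl ih =>
    by_cases hc : pvIsCls hd.2 <;> by_cases hs : pvIsSub hd.2 <;>
      · unfold pvIsCls pvIsSub at *
        simp_all <;> omega

-- ===== VERDICT (by name: the statement is the Claim_ definition above) =====
theorem analyze_section_types_py_spec : Claim_equal_analyze_section_types_py := by
  intro sections _
  unfold Spec_analyze_section_types_py analyze_section_types_py analyze_section_types_py_alt
  rw [pvLoop_items]
  have h := pvPartition sections
  unfold pvIsCls pvIsSub at h ⊢
  simp only [List.filter_map, Function.comp_def, List.length_map, List.cons.injEq,
    Prod.mk.injEq, and_true, true_and]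
  omega
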